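-- pv_equiv track=rewrite | github.com/Gre-mie/advent-of-code | 2024/1-Dec/main.py | create_differences_list
-- ===== SOURCE A (Python) =====
-- def find_difference(min_1, min_2):
--     smallest = sorted([min_1, min_2])
--     return smallest[1] - smallest[0]
--
-- def create_differences_list(list_1, list_2, differences):
--     l1 = list_1.copy()
--     l2 = list_2.copy()
--     for _ in range(len(list_1)):
--         smallest_in_list_1 = min(l1)
--         smallest_in_list_2 = min(l2)
--         differences.append(find_difference(smallest_in_list_1, smallest_in_list_2))
--         l1.remove(smallest_in_list_1)
--         l2.remove(smallest_in_list_2)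
--     return differences
-- ===== SOURCE B (Python) =====
-- def create_differences_list(list_1, list_2, differences):
--     # Sort both lists once and pair by position, instead of repeated min+remove scans.
--     # Mutates `differences` in place (append), like A; raises (IndexError) if list_2 is shorter.
--     s1 = sorted(list_1)
--     s2 = sorted(list_2)
--     for i in range(len(s1)):
--         differences.append(abs(s1[i] - s2[i]))
--     return differences
-- ===== Notes on version B (the rewrite author's own statement) =====
-- stated objective: faster
-- what changed: Replaces the quadratic repeated min()+remove() selection loop with sorting both lists once and zipping the sorted lists, taking absolute differences.
import Mathlib
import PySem

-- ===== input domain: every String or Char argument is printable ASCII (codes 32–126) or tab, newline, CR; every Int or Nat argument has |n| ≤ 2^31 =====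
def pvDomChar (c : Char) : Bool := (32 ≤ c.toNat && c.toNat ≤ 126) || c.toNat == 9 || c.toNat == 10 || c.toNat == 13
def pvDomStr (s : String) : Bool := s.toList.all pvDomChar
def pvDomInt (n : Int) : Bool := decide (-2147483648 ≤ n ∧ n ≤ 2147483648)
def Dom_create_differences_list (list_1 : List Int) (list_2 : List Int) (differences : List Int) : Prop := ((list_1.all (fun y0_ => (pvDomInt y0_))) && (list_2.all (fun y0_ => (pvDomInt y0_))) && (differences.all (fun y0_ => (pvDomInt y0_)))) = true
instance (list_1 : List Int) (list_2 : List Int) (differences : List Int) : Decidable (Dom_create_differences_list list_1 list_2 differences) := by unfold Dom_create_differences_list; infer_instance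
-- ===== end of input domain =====

-- B sorts both lists once and pairs them by position, replacing A's repeated min+remove selection loop.
-- Both Pythons mutate `differences` in place (append); equivalence is about the return value.


-- ===== PORT A =====
-- find_difference: sorted pair, larger minus smaller (indexing a 2-element list cannot fail; getD 0 is unreachable)
def find_difference (min_1 : Int) (min_2 : Int) : Int :=
  let smallest := PySem.List.sorted [min_1, min_2] (fun x => x) false
  (PySem.List.pyGet? smallest 1).getD 0 - (PySem.List.pyGet? smallest 0).getD 0

-- the `for _ in range(len(list_1))` loop; `none` from min?/remove? is Python's ValueError (excluded by Pre_)
def cdlLoop : Nat → List Int → List Int → List Int → List Int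
  | 0, _, _, diffs => diffs
  | n + 1, l1, l2, diffs =>
    match PySem.List.min? l1 (fun x => x), PySem.List.min? l2 (fun x => x) with
    | some m1, some m2 =>
        cdlLoop n ((PySem.List.remove? l1 m1).getD l1) ((PySem.List.remove? l2 m2).getD l2)
          (diffs ++ [find_difference m1 m2])
    | _, _ => diffs

def create_differences_list (list_1 : List Int) (list_2 : List Int) (differences : List Int) : List Int :=
  cdlLoop list_1.length list_1 list_2 differences

-- ===== PORT B =====
-- `for i in range(len(s1)): differences.append(abs(s1[i] - s2[i]))`; s2[i]'s IndexError
-- (list_2 shorter) lies outside Pre_, where getD 0 is unreachable.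
def create_differences_list_alt (list_1 : List Int) (list_2 : List Int) (differences : List Int) : List Int :=
  let s1 := PySem.List.sorted list_1 (fun x => x) false
  let s2 := PySem.List.sorted list_2 (fun x => x) false
  (PySem.List.pyRange 0 (PySem.List.len s1) 1).foldl
    (fun acc i => acc ++ [|(PySem.List.pyGet? s1 i).getD 0 - (PySem.List.pyGet? s2 i).getD 0|])
    differences

-- ===== PRECONDITION & SPEC =====
-- A raises ValueError (min of an empty list) when list_2 is shorter than list_1; those inputs are excluded.
def Pre_create_differences_list (list_1 : List Int) (list_2 : List Int) (differences : List Int) : Prop :=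
  list_1.length ≤ list_2.length
instance (list_1 : List Int) (list_2 : List Int) (differences : List Int) : Decidable (Pre_create_differences_list list_1 list_2 differences) := by unfold Pre_create_differences_list; infer_instance
def pvWitness_create_differences_list : List Int × List Int × List Int := ([3, 1], [2, 5, 4], [7])

def Spec_create_differences_list (list_1 : List Int) (list_2 : List Int) (differences : List Int) (out : List Int) : Prop := out = create_differences_list_alt list_1 list_2 differences
instance (list_1 : List Int) (list_2 : List Int) (differences : List Int) (out : List Int) : Decidable (Spec_create_differences_list list_1 list_2 differences out) := by unfold Spec_create_differences_list; infer_instance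

-- ===== CLAIM (what is proved, stated in full; the proofs are below) =====
def Claim_equal_create_differences_list : Prop := ∀ (list_1 : List Int) (list_2 : List Int) (differences : List Int), Dom_create_differences_list list_1 list_2 differences → Pre_create_differences_list list_1 list_2 differences → Spec_create_differences_list list_1 list_2 differences (create_differences_list list_1 list_2 differences)

-- ===== LEMMAS AND PROOFS =====

theorem find_difference_eq_abs (a b : Int) : find_difference a b = |a - b| := by
  by_cases h : a ≤ b
  · simp [find_difference, PySem.List.sorted_eq_foldl_insertBy, PySem.List.insertBy,
      not_lt.mpr h, PySem.List.pyGet?, PySem.List.pyIdx?, abs_of_nonpos (sub_nonpos.mpr h)]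
  · have h' : b < a := lt_of_not_ge h
    simp [find_difference, PySem.List.sorted_eq_foldl_insertBy, PySem.List.insertBy, h',
      PySem.List.pyGet?, PySem.List.pyIdx?, abs_of_nonneg (sub_nonneg.mpr h'.le)]

theorem sorted_min_cons_erase (l : List Int) (m : Int)
    (hm : PySem.List.min? l (fun x => x) = some m) :
    PySem.List.sorted l (fun x => x) false =
      m :: PySem.List.sorted (l.erase m) (fun x => x) false := by
  have hmem : m ∈ l := PySem.List.min?_mem hm
  have hmin : ∀ y ∈ l, m ≤ y := PySem.List.min?_isMin hm
  apply PySem.List.sorted_id_eq_of_perm_of_pairwise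
  · exact ((PySem.List.sorted_perm _ _ _).cons m).trans (l.perm_cons_erase hmem).symm
  · refine List.pairwise_cons.mpr ⟨?_, ?_⟩
    · intro y hy
      exact hmin y (l.erase_subset ((PySem.List.mem_sorted _ _ _ _).mp hy))
    · exact PySem.List.sorted_pairwise (xs := l.erase m) (key := fun x => x)

-- A's loop computes `differences` followed by the pairwise |·| over the two sorted lists.
theorem cdlLoop_eq (n : Nat) : ∀ (l1 l2 d : List Int), l1.length = n → l1.length ≤ l2.length →
    cdlLoop n l1 l2 d = d ++
      ((PySem.List.sorted l1 (fun x => x) false).zip (PySem.List.sorted l2 (fun x => x) false)).map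
        (fun p => |p.1 - p.2|) := by
  induction n with
  | zero =>
    intro l1 l2 d hlen _
    have : l1 = [] := List.eq_nil_of_length_eq_zero hlen
    simp [this, cdlLoop, PySem.List.sorted_eq_nil_iff]
  | succ n ih =>
    intro l1 l2 d hlen hle
    have h1 : l1 ≠ [] := by intro h; simp [h] at hlen
    have h2 : l2 ≠ [] := by
      intro h; rw [h] at hle; simp only [List.length_nil, Nat.le_zero] at hle; omega
    obtain ⟨m1, hm1⟩ : ∃ m, PySem.List.min? l1 (fun x => x) = some m := by
      cases hc : PySem.List.min? l1 (fun x => x) with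
      | none => exact absurd ((PySem.List.min?_eq_none_iff _ _).mp hc) h1
      | some m => exact ⟨m, rfl⟩
    obtain ⟨m2, hm2⟩ : ∃ m, PySem.List.min? l2 (fun x => x) = some m := by
      cases hc : PySem.List.min? l2 (fun x => x) with
      | none => exact absurd ((PySem.List.min?_eq_none_iff _ _).mp hc) h2
      | some m => exact ⟨m, rfl⟩
    have hmem1 : m1 ∈ l1 := PySem.List.min?_mem hm1
    have hmem2 : m2 ∈ l2 := PySem.List.min?_mem hm2
    have hr1 : PySem.List.remove? l1 m1 = some (l1.erase m1) := PySem.List.remove?_eq_some_erase _ _ hmem1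
    have hr2 : PySem.List.remove? l2 m2 = some (l2.erase m2) := PySem.List.remove?_eq_some_erase _ _ hmem2
    have hlen1 : (l1.erase m1).length = n := by
      rw [List.length_erase_of_mem hmem1]; omega
    have hlen2 : (l1.erase m1).length ≤ (l2.erase m2).length := by
      rw [List.length_erase_of_mem hmem1, List.length_erase_of_mem hmem2]; omega
    rw [show cdlLoop (n + 1) l1 l2 d =
        cdlLoop n ((PySem.List.remove? l1 m1).getD l1) ((PySem.List.remove? l2 m2).getD l2)
          (d ++ [find_difference m1 m2]) by simp [cdlLoop, hm1, hm2]]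
    rw [hr1, hr2]
    simp only [Option.getD_some]
    rw [ih _ _ _ hlen1 hlen2]
    simp only [sorted_min_cons_erase l1 m1 hm1, sorted_min_cons_erase l2 m2 hm2,
      List.zip_cons_cons, List.map_cons, find_difference_eq_abs, List.append_assoc,
      List.singleton_append]

-- positional map over range = map over the zip, when the first list is not longer
theorem range_map_eq_zip_map : ∀ (a : List Int), ∀ (b : List Int), a.length ≤ b.length →
    (List.range a.length).map (fun j => |a[j]?.getD 0 - b[j]?.getD 0|) =
      (a.zip b).map (fun p => |p.1 - p.2|) := by
  intro a
  induction a with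
  | nil => intro b _; simp
  | cons x a ih =>
    intro b hle
    cases b with
    | nil => simp at hle
    | cons y b =>
      simp only [List.length_cons, List.range_succ_eq_map, List.map_cons, List.map_map,
        List.zip_cons_cons]
      simp only [List.getElem?_cons_zero, Option.getD_some]
      rw [← ih b (by simpa using hle)]
      congr 1

-- B's fold computes the same expression.
theorem alt_eq_zip (l1 l2 d : List Int) (h : l1.length ≤ l2.length) :
    create_differences_list_alt l1 l2 d = d ++
      ((PySem.List.sorted l1 (fun x => x) false).zip (PySem.List.sorted l2 (fun x => x) false)).map
        (fun p => |p.1 - p.2|) := by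
  unfold create_differences_list_alt
  rw [PySem.List.foldl_append_singleton_eq_map]
  congr 1
  rw [PySem.List.len_eq, PySem.List.pyRange_zero_natCast, List.map_map]
  have hlen : (PySem.List.sorted l1 (fun x => x) false).length ≤
      (PySem.List.sorted l2 (fun x => x) false).length := by
    rw [(PySem.List.sorted_perm l1 (fun x => x) false).length_eq,
      (PySem.List.sorted_perm l2 (fun x => x) false).length_eq] at *
    exact h
  rw [← range_map_eq_zip_map _ _ hlen]
  apply List.map_congr_left
  intro j _
  simp [PySem.List.pyGet?_natCast]

-- ===== VERDICT (by name: the statement is the Claim_ definition above) =====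
theorem create_differences_list_spec : Claim_equal_create_differences_list := by
  intro l1 l2 d _ hpre
  unfold Spec_create_differences_list create_differences_list
  rw [cdlLoop_eq l1.length l1 l2 d rfl hpre, alt_eq_zip l1 l2 d hpre]
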